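-- pv_equiv track=rewrite | github.com/camerontofani/CS5319-Final-Project-Group-04-Tofani-Macias-Postel | selected/backend/app/services/plan_service.py | _chunks_from_hours
-- ===== SOURCE A (Python) =====
-- from typing import List, Tuple
--
-- def _chunks_from_hours(hours: List[int]) -> List[Tuple[int, int]]:
--     if not hours:
--         return []
--     hours = sorted(set(hours))
--     chunks: List[Tuple[int, int]] = []
--     start = hours[0]
--     prev = hours[0]
--     for h in hours[1:]:
--         if h == prev + 1:
--             prev = h
--         else:
--             chunks.append((start, prev))
--             start = h
--             prev = h
--     chunks.append((start, prev))
--     return chunks[:3]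
-- ===== SOURCE B (Python) =====
-- from typing import List, Tuple
--
-- def _chunks_from_hours(hours: List[int]) -> List[Tuple[int, int]]:
--     s = set(hours)
--     out: List[Tuple[int, int]] = []
--     for start in sorted(h for h in s if h - 1 not in s)[:3]:
--         end = start
--         while end + 1 in s:
--             end += 1
--         out.append((start, end))
--     return out
-- ===== Notes on version B (the rewrite author's own statement) =====
-- stated objective: alternative
-- what changed: Replaces A's sort-everything-then-linear-scan with the hash-set method: a run start is an element h whose predecessor h-1 is not in the set, only those starts are sorted and cut to 3, and each interval end is found by walking successive set-membership queries.
import Mathlib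
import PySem

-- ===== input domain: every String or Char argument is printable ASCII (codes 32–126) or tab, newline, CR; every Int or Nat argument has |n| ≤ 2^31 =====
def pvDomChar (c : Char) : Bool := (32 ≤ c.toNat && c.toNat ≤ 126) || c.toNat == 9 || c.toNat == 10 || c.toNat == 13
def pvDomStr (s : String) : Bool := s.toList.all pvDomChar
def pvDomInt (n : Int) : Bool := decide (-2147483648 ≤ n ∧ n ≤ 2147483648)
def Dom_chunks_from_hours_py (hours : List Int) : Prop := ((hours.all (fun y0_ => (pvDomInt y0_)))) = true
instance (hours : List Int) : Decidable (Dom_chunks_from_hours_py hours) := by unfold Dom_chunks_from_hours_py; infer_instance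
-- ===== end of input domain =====

-- B drops A's sort-everything-then-scan strategy for the hash-set method: run starts are
-- the elements whose predecessor is absent from the set, only those are sorted (and cut
-- to 3), and each run's end is found by walking successive membership queries
-- (objective: alternative).

-- ===== PORT A =====
-- loop body of A's 'for h in hours[1:]', state (chunks, start, prev)
def chunksStepA (st : List (Int × Int) × Int × Int) (h : Int) : List (Int × Int) × Int × Int :=
  if h = st.2.2 + 1 then (st.1, st.2.1, h)
  else (st.1 ++ [(st.2.1, st.2.2)], h, h)

def chunks_from_hours_py (hours : List Int) : List (Int × Int) :=
  if hours = [] then []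
  else
    match PySem.List.sorted (PySem.Set.ofList hours) (fun x => x) false with
    | [] => []
    | h0 :: rest =>
      let st := rest.foldl chunksStepA ([], h0, h0)
      (st.1 ++ [(st.2.1, st.2.2)]).take 3

-- ===== PORT B =====
-- Source B's 'end = start; while end + 1 in s: end += 1; … (start, end)'. The fuel s.length
-- only makes the loop total: started from a member of s it can make at most
-- s.length - 1 successful steps, so the fuel is never exhausted before the test fails.
def walkEnd (s : List Int) : Nat → Int → Int
  | 0, e => e
  | f + 1, e => if s.contains (e + 1) then walkEnd s f (e + 1) else e

def chunks_from_hours_py_alt (hours : List Int) : List (Int × Int) :=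
  let s : PySem.Set Int := PySem.Set.ofList hours
  let starts := (PySem.List.sorted (s.filter (fun h => !(PySem.Set.contains s (h - 1)))) (fun x => x) false).take 3
  starts.map (fun st => (st, walkEnd s s.length st))

-- ===== PRECONDITION & SPEC =====
def Spec_chunks_from_hours_py (hours : List Int) (out : List (Int × Int)) : Prop := out = chunks_from_hours_py_alt hours
instance (hours : List Int) (out : List (Int × Int)) : Decidable (Spec_chunks_from_hours_py hours out) := by unfold Spec_chunks_from_hours_py; infer_instance

-- ===== CLAIM (what is proved, stated in full; the proofs are below) =====
def Claim_equal_chunks_from_hours_py : Prop := ∀ (hours : List Int), Dom_chunks_from_hours_py hours → Spec_chunks_from_hours_py hours (chunks_from_hours_py hours)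

-- ===== LEMMAS AND PROOFS =====

-- Reference description used by the proof: peel one maximal consecutive run at a time.
def peelRun (start prev : Int) : List Int → (Int × Int) × List Int
  | [] => ((start, prev), [])
  | h :: t => if h = prev + 1 then peelRun start h t else ((start, prev), h :: t)

theorem peelRun_nil (start prev : Int) : peelRun start prev [] = ((start, prev), []) := rfl

theorem peelRun_cons (start prev h : Int) (t : List Int) :
    peelRun start prev (h :: t) =
      if h = prev + 1 then peelRun start h t else ((start, prev), h :: t) := rfl

theorem peelRun_rest_length_le (start prev : Int) (xs : List Int) :
    (peelRun start prev xs).2.length ≤ xs.length := by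
  induction xs generalizing prev with
  | nil => simp [peelRun]
  | cons h t ih =>
    simp only [peelRun]
    split
    · exact Nat.le_succ_of_le (ih h)
    · simp

-- Structure of peelRun on a strictly increasing tail whose elements exceed prev:
-- it returns (start, e) with prev ≤ e, consumes exactly the elements in (prev, e],
-- and leaves a strictly increasing remainder whose elements exceed e + 1.
theorem peelRun_spec (xs : List Int) (start prev : Int)
    (hp : xs.Pairwise (· < ·)) (hgt : ∀ y ∈ xs, prev < y) :
    (peelRun start prev xs).1.1 = start ∧
    prev ≤ (peelRun start prev xs).1.2 ∧
    (peelRun start prev xs).2.Pairwise (· < ·) ∧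
    (∀ y ∈ (peelRun start prev xs).2, (peelRun start prev xs).1.2 + 1 < y) ∧
    (∀ y, y ∈ xs ↔ (prev < y ∧ y ≤ (peelRun start prev xs).1.2) ∨ y ∈ (peelRun start prev xs).2) ∧
    (∃ c, xs = c ++ (peelRun start prev xs).2 ∧
      ∀ y ∈ c, prev < y ∧ y ≤ (peelRun start prev xs).1.2) := by
  induction xs generalizing prev with
  | nil =>
    refine ⟨rfl, le_refl _, List.Pairwise.nil, by simp [peelRun_nil], ?_, [], by simp [peelRun_nil], by simp⟩
    intro y; rw [peelRun_nil]; simp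
  | cons h t ih =>
    rcases List.pairwise_cons.mp hp with ⟨hht, htp⟩
    by_cases hc : h = prev + 1
    · subst hc
      rw [peelRun_cons, if_pos rfl]
      obtain ⟨h1, h2, h3, h4, h5, c, hc1, hc2⟩ := ih (prev + 1) htp hht
      refine ⟨h1, by omega, h3, h4, ?_, (prev + 1) :: c, by simp [← hc1], ?_⟩
      · intro y
        rw [List.mem_cons, h5 y]
        constructor
        · rintro (rfl | ⟨hy1, hy2⟩ | hy)
          · exact Or.inl ⟨by omega, by omega⟩
          · exact Or.inl ⟨by omega, hy2⟩
          · exact Or.inr hy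
        · rintro (⟨hy1, hy2⟩ | hy)
          · rcases eq_or_ne y (prev + 1) with rfl | hne
            · exact Or.inl rfl
            · exact Or.inr (Or.inl ⟨by omega, hy2⟩)
          · exact Or.inr (Or.inr hy)
      · intro y hy
        rcases List.mem_cons.mp hy with rfl | hy'
        · exact ⟨by omega, h2⟩
        · have := hc2 y hy'; exact ⟨by omega, this.2⟩
    · have hh : prev < h := hgt h (by simp)
      rw [peelRun_cons, if_neg hc]
      dsimp only
      refine ⟨rfl, le_refl _, hp, ?_, ?_, [], by simp, by simp⟩
      · intro y hy
        rcases List.mem_cons.mp hy with rfl | hy'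
        · omega
        · have := hht y hy'; omega
      · intro y
        constructor
        · intro hy; exact Or.inr hy
        · rintro (⟨hy1, hy2⟩ | hy)
          · omega
          · exact hy

def runs : List Int → List (Int × Int)
  | [] => []
  | x :: xs =>
    let p := peelRun x x xs
    p.1 :: runs p.2
termination_by xs => xs.length
decreasing_by
  simp only [List.length_cons]
  exact Nat.lt_succ_of_le (peelRun_rest_length_le x x xs)

theorem runs_cons (x : Int) (xs : List Int) :
    runs (x :: xs) = (peelRun x x xs).1 :: runs (peelRun x x xs).2 := by
  rw [runs]

-- A's fold equals the peel-based description (any accumulated chunks prefixed).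
theorem foldl_eq_runs (rest : List Int) (acc : List (Int × Int)) (start prev : Int) :
    (rest.foldl chunksStepA (acc, start, prev)).1 ++
      [((rest.foldl chunksStepA (acc, start, prev)).2.1,
        (rest.foldl chunksStepA (acc, start, prev)).2.2)] =
    acc ++ (peelRun start prev rest).1 :: runs (peelRun start prev rest).2 := by
  induction rest generalizing acc start prev with
  | nil => simp [peelRun, runs]
  | cons h t ih =>
    by_cases hc : h = prev + 1
    · simpa [chunksStepA, peelRun, hc] using ih acc start h
    · simp only [List.foldl_cons, chunksStepA, hc, peelRun, if_neg, not_false_iff]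
      rw [ih (acc ++ [(start, prev)]) h h, runs_cons]
      simp

-- The first components of the runs of a strictly increasing L are exactly the
-- elements of L without a predecessor in M, for any M agreeing with L on predecessors.
theorem runs_fst (L M : List Int) (hL : L.Pairwise (· < ·))
    (hM : ∀ y ∈ L, ((y - 1) ∈ M ↔ (y - 1) ∈ L)) :
    (runs L).map Prod.fst = L.filter (fun h => !(M.contains (h - 1))) := by
  induction L using runs.induct with
  | case1 => simp [runs]
  | case2 x xs P ih =>
    rcases List.pairwise_cons.mp hL with ⟨hxlt, hxs⟩
    obtain ⟨h1, h2, h3, h4, h5, c, hc1, hc2⟩ := peelRun_spec xs x x hxs hxlt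
    have hmemxs : ∀ y ∈ P.2, y ∈ xs := fun y hy => (h5 y).mpr (Or.inr hy)
    have hMrest : ∀ y ∈ P.2, ((y - 1) ∈ M ↔ (y - 1) ∈ P.2) := by
      intro y hy
      have hye := h4 y hy
      rw [hM y (List.mem_cons_of_mem x (hmemxs y hy))]
      constructor
      · intro hin
        rcases List.mem_cons.mp hin with heq | hin'
        · omega
        · rcases (h5 _).mp hin' with ⟨ha, hb⟩ | h'
          · omega
          · exact h'
      · intro h'
        exact List.mem_cons_of_mem x ((h5 _).mpr (Or.inr h'))
    have hpx : M.contains (x - 1) = false := by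
      rw [List.contains_eq_mem, decide_eq_false_iff_not]
      intro hin
      have hx1 := (hM x (List.mem_cons_self)).mp hin
      rcases List.mem_cons.mp hx1 with heq | hin'
      · omega
      · rcases (h5 _).mp hin' with ⟨ha, hb⟩ | h'
        · omega
        · have := h4 _ h'; omega
    have hfc : ∀ y ∈ c, (M.contains (y - 1)) = true := by
      intro y hy
      have hxy := hc2 y hy
      have hyxs : y ∈ xs := by rw [hc1]; exact List.mem_append_left _ hy
      rw [List.contains_eq_mem, decide_eq_true_iff]
      rw [hM y (List.mem_cons_of_mem x hyxs)]
      rcases eq_or_ne y (x + 1) with rfl | hne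
      · have hxx : x + 1 - 1 = x := by omega
        rw [hxx]; exact List.mem_cons_self
      · exact List.mem_cons_of_mem x ((h5 _).mpr (Or.inl ⟨by omega, by omega⟩))
    rw [runs_cons, List.map_cons, h1, ih h3 hMrest]
    have hfilter : List.filter (fun h => !M.contains (h - 1)) (x :: xs) =
        x :: List.filter (fun h => !M.contains (h - 1)) P.2 := by
      rw [List.filter_cons_of_pos (by rw [hpx]; rfl), hc1, List.filter_append]
      rw [List.filter_eq_nil_iff.mpr (by intro y hy; rw [hfc y hy]; simp)]
      rw [List.nil_append]
    rw [hfilter]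

-- Each run (st, e) of a strictly increasing L satisfies: st ≤ e, all of st..e in L,
-- and e + 1 not in L.
theorem runs_pairs (L : List Int) (hL : L.Pairwise (· < ·)) :
    ∀ p ∈ runs L, p.1 ≤ p.2 ∧ (∀ y, p.1 ≤ y → y ≤ p.2 → y ∈ L) ∧ (p.2 + 1) ∉ L := by
  induction L using runs.induct with
  | case1 => simp [runs]
  | case2 x xs P ih =>
    rcases List.pairwise_cons.mp hL with ⟨hxlt, hxs⟩
    obtain ⟨h1, h2, h3, h4, h5, c, hc1, hc2⟩ := peelRun_spec xs x x hxs hxlt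
    have hmemxs : ∀ y ∈ P.2, y ∈ xs := fun y hy => (h5 y).mpr (Or.inr hy)
    intro p hp
    rw [runs_cons] at hp
    rcases List.mem_cons.mp hp with rfl | hp'
    · refine ⟨by rw [h1]; exact h2, ?_, ?_⟩
      · intro y hy1 hy2
        rw [h1] at hy1
        rcases eq_or_lt_of_le hy1 with rfl | hlt
        · exact List.mem_cons_self
        · exact List.mem_cons_of_mem x ((h5 y).mpr (Or.inl ⟨hlt, hy2⟩))
      · intro hin
        rcases List.mem_cons.mp hin with heq | hin'
        · omega
        · rcases (h5 _).mp hin' with ⟨ha, hb⟩ | h'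
          · omega
          · have := h4 _ h'; omega
    · obtain ⟨ih1, ih2, ih3⟩ := ih h3 p hp'
      have hp1 : p.1 ∈ P.2 := ih2 p.1 le_rfl ih1
      have hpe := h4 _ hp1
      refine ⟨ih1, ?_, ?_⟩
      · intro y hy1 hy2
        exact List.mem_cons_of_mem x (hmemxs _ (ih2 y hy1 hy2))
      · intro hin
        rcases List.mem_cons.mp hin with heq | hin'
        · omega
        · rcases (h5 _).mp hin' with ⟨ha, hb⟩ | h'
          · omega
          · exact ih3 h'

-- The membership walk reaches the run's end when given enough fuel.
theorem walkEnd_spec (s : List Int) (f : Nat) (st e : Int) (hle : st ≤ e)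
    (hmem : ∀ y, st < y → y ≤ e → y ∈ s) (hout : (e + 1) ∉ s)
    (hf : (e - st).toNat ≤ f) : walkEnd s f st = e := by
  induction f generalizing st with
  | zero => simp only [walkEnd]; omega
  | succ f ih =>
    rcases eq_or_lt_of_le hle with rfl | hlt
    · simp [walkEnd, hout]
    · have hmem1 : (st + 1) ∈ s := hmem (st + 1) (by omega) (by omega)
      simp only [walkEnd, List.contains_eq_mem, hmem1, decide_true, if_pos]
      exact ih (st + 1) (by omega) (fun y h1 h2 => hmem y (by omega) h2) (by omega)

-- The runs of the sorted set, cut to 3, are B's starts-then-walk result.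
theorem main_key (hours : List Int) :
    (runs (PySem.List.sorted (PySem.Set.ofList hours) (fun x => x) false)).take 3 =
    ((PySem.List.sorted ((PySem.Set.ofList hours).filter
        (fun h => !(PySem.Set.contains (PySem.Set.ofList hours) (h - 1)))) (fun x => x) false).take 3).map
      (fun st => (st, walkEnd (PySem.Set.ofList hours) (PySem.Set.ofList hours).length st)) := by
  set s := PySem.Set.ofList hours with hsdef
  set L := PySem.List.sorted s (fun x => x) false with hLdef
  have hLp : L.Pairwise (· < ·) := PySem.List.sorted_ofList_pairwise_lt hours
  have hmem : ∀ y : Int, y ∈ L ↔ y ∈ s := fun y => PySem.List.mem_sorted s (fun x => x) false y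
  have hlen : L.length = s.length := PySem.List.length_sorted s (fun x => x) false
  have hpeq : (fun h : Int => !(PySem.Set.contains s (h - 1))) = (fun h : Int => !(s.contains (h - 1))) := rfl
  rw [hpeq]
  have hstarts : PySem.List.sorted (s.filter (fun h => !(s.contains (h - 1)))) (fun x => x) false =
      L.filter (fun h => !(s.contains (h - 1))) := by
    apply PySem.List.sorted_eq_of_perm_of_pairwise_lt
    · exact (PySem.List.sorted_perm s (fun x => x) false).filter _
    · exact hLp.filter _
  have hfst : (runs L).map Prod.fst = L.filter (fun h => !(s.contains (h - 1))) :=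
    runs_fst L s hLp (fun y _ => (hmem (y - 1)).symm)
  have hpair := runs_pairs L hLp
  have hmapid : (runs L).map (fun pr => ((pr.1 : Int), walkEnd s s.length pr.1)) = runs L := by
    rw [List.map_congr_left (g := fun a => a) ?_]
    · exact List.map_id' _
    · intro pr hpr
      obtain ⟨w1, w2, w3⟩ := hpair pr hpr
      have hfuel : (pr.2 - pr.1).toNat ≤ s.length := by
        have hsub : (PySem.List.pyRange pr.1 (pr.2 + 1) 1) ⊆ L := by
          intro z hz
          rw [PySem.List.mem_pyRange_one] at hz
          exact w2 z hz.1 (by omega)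
        have hlr := (List.subperm_of_subset (PySem.List.nodup_pyRange_one _ _) hsub).length_le
        rw [PySem.List.length_pyRange_one] at hlr
        omega
      have := walkEnd_spec s s.length pr.1 pr.2 w1
        (fun y h1 h2 => (hmem y).mp (w2 y (le_of_lt h1) h2))
        (fun hc => w3 ((hmem _).mpr hc)) hfuel
      rw [this]
  rw [hstarts, ← hfst, ← List.map_take, List.map_map]
  rw [show ((fun st : Int => (st, walkEnd s s.length st)) ∘ Prod.fst) =
      (fun pr : Int × Int => ((pr.1 : Int), walkEnd s s.length pr.1)) from rfl]
  rw [List.map_take, hmapid]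

-- ===== VERDICT (by name: the statement is the Claim_ definition above) =====
theorem chunks_from_hours_py_spec : Claim_equal_chunks_from_hours_py := by
  intro hours _
  unfold Spec_chunks_from_hours_py chunks_from_hours_py chunks_from_hours_py_alt
  by_cases hnil : hours = []
  · subst hnil; rfl
  · simp only [hnil, if_false]
    cases hs : PySem.List.sorted (PySem.Set.ofList hours) (fun x => x) false with
    | nil =>
      have h1 : PySem.Set.ofList hours = [] := (PySem.List.sorted_eq_nil_iff _ _ _).mp hs
      have : hours = [] := by
        cases hx : hours with
        | nil => rfl
        | cons y ys =>
          have hy : y ∈ PySem.Set.ofList hours := by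
            rw [PySem.Set.mem_ofList]; simp [hx]
          rw [h1] at hy; cases hy
      exact absurd this hnil
    | cons h0 rest =>
      show ((rest.foldl chunksStepA ([], h0, h0)).1 ++
        [((rest.foldl chunksStepA ([], h0, h0)).2.1,
          (rest.foldl chunksStepA ([], h0, h0)).2.2)]).take 3 = _
      rw [foldl_eq_runs rest [] h0 h0, List.nil_append, ← runs_cons, ← hs]
      exact main_key hours
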